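-- pv_equiv track=rewrite | github.com/phcmas/algorithm | leetcode/python/backup/test2.py | can_sorted_by_reverse
-- ===== SOURCE A (Python) =====
-- from typing import List
--
-- def can_sorted_by_reverse(arr_sorted: List[int], arr: List[int]):
--     left, right = -1, -1
--     left_arr, right_arr = [], []
--
--     for idx, nums in enumerate(zip(arr_sorted, arr)):
--         if nums[0] != nums[1] and left == -1:
--             left = idx
--             left_arr.append(nums[0])
--             right_arr.append(nums[1])
--         elif nums[0] != nums[1]:
--             right = idx
--             left_arr.append(nums[0])
--             right_arr.append(nums[1])
--
--     if left_arr == right_arr[::-1]: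
--         return True, left, right
--
--     return False, -1, -1
-- ===== SOURCE B (Python) =====
-- from typing import List
--
-- def can_sorted_by_reverse(arr_sorted: List[int], arr: List[int]):
--     i = 0
--     j = min(len(arr_sorted), len(arr)) - 1
--     first, last = -1, -1
--     while i <= j:
--         if arr_sorted[i] == arr[i]:
--             i += 1
--             continue
--         if arr_sorted[j] == arr[j]:
--             j -= 1
--             continue
--         # both positions mismatch
--         if first == -1:
--             first, last = i, j
--         if i == j:
--             return False, -1, -1  # odd number of mismatches: middle cannot match
--         if arr_sorted[i] != arr[j] or arr_sorted[j] != arr[i]: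
--             return False, -1, -1
--         i += 1
--         j -= 1
--     right = last if last != first else -1
--     return True, first, right
-- ===== Notes on version B (the rewrite author's own statement) =====
-- stated objective: faster
-- what changed: Replaces A's build-two-mismatch-lists-then-reverse-compare with an in-place two-pointer converging scan over indices that skips agreeing positions and compares mismatched ends pairwise, allocating no lists and returning False early.
import Mathlib
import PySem

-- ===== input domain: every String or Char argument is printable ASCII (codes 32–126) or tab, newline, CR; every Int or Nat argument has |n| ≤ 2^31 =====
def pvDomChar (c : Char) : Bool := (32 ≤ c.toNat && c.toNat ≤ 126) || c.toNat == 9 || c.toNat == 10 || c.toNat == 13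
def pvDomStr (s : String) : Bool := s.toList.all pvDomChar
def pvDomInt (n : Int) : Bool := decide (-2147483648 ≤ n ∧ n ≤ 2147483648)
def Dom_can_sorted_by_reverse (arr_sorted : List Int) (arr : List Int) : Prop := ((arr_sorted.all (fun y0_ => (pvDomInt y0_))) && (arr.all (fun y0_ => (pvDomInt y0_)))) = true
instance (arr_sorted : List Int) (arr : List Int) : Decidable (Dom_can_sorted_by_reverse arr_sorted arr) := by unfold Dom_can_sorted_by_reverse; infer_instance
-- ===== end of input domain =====

-- B replaces A's build-two-mismatch-lists-then-reverse-compare with a two-pointer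
-- converging index scan over the same arrays (different decomposition, no list allocation).

-- ===== PORT A =====
-- A's loop state = (left, right, left_arr, right_arr), updated exactly as A's branches do
def pvAStep (st : Int × Int × List Int × List Int) (p : Int × Int × Int) :
    Int × Int × List Int × List Int :=
  let left := st.1; let right := st.2.1; let la := st.2.2.1; let ra := st.2.2.2
  let idx := p.1; let nums := p.2
  if nums.1 ≠ nums.2 ∧ left = -1 then
    (idx, right, la ++ [nums.1], ra ++ [nums.2])
  else if nums.1 ≠ nums.2 then
    (left, idx, la ++ [nums.1], ra ++ [nums.2])
  else
    (left, right, la, ra)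

def can_sorted_by_reverse (arr_sorted : List Int) (arr : List Int) : Bool × Int × Int :=
  let st := (PySem.List.enumerate (arr_sorted.zip arr) 0).foldl pvAStep (-1, -1, [], [])
  -- right_arr[::-1]: step -1, never raises, so getD [] is exact
  if st.2.2.1 = (PySem.List.slice? st.2.2.2 none none (-1)).getD [] then
    (true, st.1, st.2.1)
  else
    (false, -1, -1)

-- ===== PORT B =====
-- the two-pointer while-loop of Source B; both indices stay in range whenever they are read
def pvBLoop (s a : List Int) (i j first last : Int) : Bool × Int × Int :=
  if _h : i ≤ j then
    if PySem.List.pyGetD s i 0 = PySem.List.pyGetD a i 0 then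
      pvBLoop s a (i + 1) j first last
    else if PySem.List.pyGetD s j 0 = PySem.List.pyGetD a j 0 then
      pvBLoop s a i (j - 1) first last
    else
      let fl := if first = -1 then (i, j) else (first, last)
      if i = j then (false, -1, -1)
      else if PySem.List.pyGetD s i 0 ≠ PySem.List.pyGetD a j 0 ∨
              PySem.List.pyGetD s j 0 ≠ PySem.List.pyGetD a i 0 then (false, -1, -1)
      else pvBLoop s a (i + 1) (j - 1) fl.1 fl.2
  else
    (true, first, if last ≠ first then last else -1)
termination_by (j + 1 - i).toNat
decreasing_by all_goals omega

def can_sorted_by_reverse_alt (arr_sorted : List Int) (arr : List Int) : Bool × Int × Int :=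
  pvBLoop arr_sorted arr 0 ((min arr_sorted.length arr.length : Nat) - 1) (-1) (-1)

-- ===== PRECONDITION & SPEC =====
def Spec_can_sorted_by_reverse (arr_sorted : List Int) (arr : List Int) (out : Bool × Int × Int) : Prop := out = can_sorted_by_reverse_alt arr_sorted arr
instance (arr_sorted : List Int) (arr : List Int) (out : Bool × Int × Int) : Decidable (Spec_can_sorted_by_reverse arr_sorted arr out) := by unfold Spec_can_sorted_by_reverse; infer_instance

-- ===== CLAIM (what is proved, stated in full; the proofs are below) =====
def Claim_equal_can_sorted_by_reverse : Prop := ∀ (arr_sorted : List Int) (arr : List Int), Dom_can_sorted_by_reverse arr_sorted arr → Spec_can_sorted_by_reverse arr_sorted arr (can_sorted_by_reverse arr_sorted arr)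

-- ===== LEMMAS AND PROOFS =====

-- mismatch predicate, the list of mismatch indices in a range, and the palindromic condition
def pvMis (s a : List Int) (k : Nat) : Bool := s.getD k 0 ≠ a.getD k 0

def pvM (s a : List Int) (i c : Nat) : List Nat := (List.range' i c).filter (pvMis s a)

def pvPal (s a : List Int) (m : List Nat) : Bool :=
  m.map (fun k => s.getD k 0) == (m.map (fun k => a.getD k 0)).reverse

-- the common value both ports are proved equal to
def pvSpecFun (s a : List Int) : Bool × Int × Int :=
  let m := pvM s a 0 (min s.length a.length)
  let f : Int := (m.head?.map Int.ofNat).getD (-1)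
  let l : Int := (m.getLast?.map Int.ofNat).getD (-1)
  if pvPal s a m then (true, f, if l = f then -1 else l) else (false, -1, -1)

lemma pyGetD_toNat (xs : List Int) (i : Int) (h : 0 ≤ i) :
    PySem.List.pyGetD xs i 0 = xs.getD i.toNat 0 := by
  have hi : i = ((i.toNat : Nat) : Int) := by omega
  conv_lhs => rw [hi]
  rw [PySem.List.pyGetD_natCast]

lemma pvPal_iff (s a : List Int) (m : List Nat) :
    pvPal s a m = true ↔
      m.map (fun k => s.getD k 0) = (m.map (fun k => a.getD k 0)).reverse := by
  simp [pvPal]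

lemma pvPal_singleton (s a : List Int) (x : Nat) :
    pvPal s a [x] = true ↔ s.getD x 0 = a.getD x 0 := by
  rw [pvPal_iff]; simp

lemma pvPal_cons_concat (s a : List Int) (x y : Nat) (m : List Nat) :
    pvPal s a (x :: (m ++ [y])) = true ↔
      s.getD x 0 = a.getD y 0 ∧ s.getD y 0 = a.getD x 0 ∧ pvPal s a m = true := by
  rw [pvPal_iff, pvPal_iff]
  simp only [List.map_cons, List.map_append, List.map_nil, List.reverse_cons,
    List.reverse_append, List.reverse_nil, List.nil_append, List.append_assoc,
    List.cons_append, List.cons.injEq, List.singleton_append]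
  constructor
  · intro h
    obtain ⟨h1, h2⟩ := h
    rw [← List.concat_eq_append, ← List.concat_eq_append, List.concat_inj] at h2
    exact ⟨h1, h2.2, h2.1⟩
  · intro h
    obtain ⟨h1, h2, h3⟩ := h
    refine ⟨h1, ?_⟩
    rw [h3, h2]


lemma pvM_skip_head (s a : List Int) (i c : Nat) (h : pvMis s a i = false) :
    pvM s a i (c + 1) = pvM s a (i + 1) c := by
  simp [pvM, List.range'_succ, h]

lemma pvM_skip_last (s a : List Int) (i c : Nat) (h : pvMis s a (i + c) = false) :
    pvM s a i (c + 1) = pvM s a i c := by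
  rw [pvM, pvM, List.range'_concat]
  simp [h]

lemma pvM_single (s a : List Int) (i : Nat) (h : pvMis s a i = true) :
    pvM s a i 1 = [i] := by
  simp [pvM, List.range'_succ, h]

lemma pvM_both (s a : List Int) (i c : Nat) (h1 : pvMis s a i = true)
    (h2 : pvMis s a (i + c + 1) = true) :
    pvM s a i (c + 2) = i :: (pvM s a (i + 1) c ++ [i + c + 1]) := by
  have e0 : c + 2 = (c + 1) + 1 := rfl
  rw [pvM, e0, List.range'_succ, List.filter_cons_of_pos h1, List.range'_concat,
    List.filter_append]
  have e1 : i + 1 + 1 * c = i + c + 1 := by omega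
  rw [e1]
  simp [pvM, h2]

theorem pvBLoop_eq (s a : List Int) (i j first last : Int) :
    0 ≤ i → (first = -1 → last = -1) →
    pvBLoop s a i j first last =
      (let m := pvM s a i.toNat (j + 1 - i).toNat
       let f : Int := if first = -1 then (m.head?.map Int.ofNat).getD (-1) else first
       let l : Int := if first = -1 then (m.getLast?.map Int.ofNat).getD (-1) else last
       if pvPal s a m then (true, f, if l = f then -1 else l) else (false, -1, -1)) := by
  induction i, j, first, last using pvBLoop.induct s a with
  | case1 i j first last hij heq ih =>
    intro hi hfl
    rw [pvBLoop]
    simp only [hij, heq, if_pos, dif_pos, if_true]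
    rw [ih (by omega) hfl]
    have hm : pvMis s a i.toNat = false := by
      rw [pyGetD_toNat s i hi, pyGetD_toNat a i hi] at heq
      simp only [List.getD_eq_getElem?_getD] at heq
      simp [pvMis, List.getD_eq_getElem?_getD, heq]
    have hc : (j + 1 - i).toNat = (j + 1 - (i + 1)).toNat + 1 := by omega
    have hi1 : (i + 1).toNat = i.toNat + 1 := by omega
    rw [hc, pvM_skip_head s a _ _ hm, hi1]
  | case2 i j first last hij hne heq ih =>
    intro hi hfl
    rw [pvBLoop]
    simp only [hij, hne, heq, dif_pos, if_neg, if_pos, if_false]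
    rw [ih hi hfl]
    have hj : (0:Int) ≤ j := by omega
    have hm : pvMis s a (i.toNat + (j - i).toNat) = false := by
      have : i.toNat + (j - i).toNat = j.toNat := by omega
      rw [this]
      rw [pyGetD_toNat s j hj, pyGetD_toNat a j hj] at heq
      simp only [List.getD_eq_getElem?_getD] at heq
      simp [pvMis, List.getD_eq_getElem?_getD, heq]
    have hc : (j + 1 - i).toNat = (j - i).toNat + 1 := by omega
    have hc2 : (j - 1 + 1 - i).toNat = (j - i).toNat := by omega
    rw [hc, pvM_skip_last s a _ _ hm, hc2]
  | case3 j first last hne1 hij hne2 =>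
    intro hi hfl
    rw [pvBLoop]
    simp only [hij, hne1, hne2, dif_pos, if_neg, if_pos, if_true]
    have hm : pvMis s a j.toNat = true := by
      rw [pyGetD_toNat s j hi, pyGetD_toNat a j hi] at hne1
      simp only [List.getD_eq_getElem?_getD] at hne1
      simp [pvMis, List.getD_eq_getElem?_getD, hne1]
    have hc : (j + 1 - j).toNat = 1 := by omega
    rw [hc, pvM_single s a _ hm]
    have hpal : ¬ pvPal s a [j.toNat] = true := by
      rw [pvPal_singleton]
      rw [pyGetD_toNat s j hi, pyGetD_toNat a j hi] at hne1
      exact hne1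
    simp [hpal]
  | case4 i j first last hij hne1 hne2 hij2 hbad =>
    intro hi hfl
    rw [pvBLoop]
    simp only [hij, hne1, hne2, hij2, hbad, dif_pos, if_neg, if_pos, if_true, if_false]
    have hj : (0:Int) ≤ j := by omega
    have hmi : pvMis s a i.toNat = true := by
      rw [pyGetD_toNat s i hi, pyGetD_toNat a i hi] at hne1
      simp only [List.getD_eq_getElem?_getD] at hne1
      simp [pvMis, List.getD_eq_getElem?_getD, hne1]
    have hmj : pvMis s a (i.toNat + (j - i - 1).toNat + 1) = true := by
      have : i.toNat + (j - i - 1).toNat + 1 = j.toNat := by omega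
      rw [this]
      rw [pyGetD_toNat s j hj, pyGetD_toNat a j hj] at hne2
      simp only [List.getD_eq_getElem?_getD] at hne2
      simp [pvMis, List.getD_eq_getElem?_getD, hne2]
    have hc : (j + 1 - i).toNat = (j - i - 1).toNat + 2 := by omega
    rw [hc, pvM_both s a _ _ hmi hmj]
    have hjn : i.toNat + (j - i - 1).toNat + 1 = j.toNat := by omega
    have hpal : ¬ pvPal s a (i.toNat :: (pvM s a (i.toNat + 1) (j - i - 1).toNat ++ [i.toNat + (j - i - 1).toNat + 1])) = true := by
      rw [pvPal_cons_concat, hjn]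
      rw [pyGetD_toNat s i hi, pyGetD_toNat a j hj] at hbad
      rw [pyGetD_toNat s j hj, pyGetD_toNat a i hi] at hbad
      rcases hbad with h | h
      · exact fun hh => h hh.1
      · exact fun hh => h hh.2.1
    simp only [if_neg hpal]
  | case5 i j first last hij hne1 hne2 fl hij2 hok ih =>
    intro hi hfl
    rw [pvBLoop]
    simp only [hij, hne1, hne2, hij2, hok, dif_pos, if_neg, if_pos, if_true, if_false]
    have hj : (0:Int) ≤ j := by omega
    have hmi : pvMis s a i.toNat = true := by
      rw [pyGetD_toNat s i hi, pyGetD_toNat a i hi] at hne1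
      simp only [List.getD_eq_getElem?_getD] at hne1
      simp [pvMis, List.getD_eq_getElem?_getD, hne1]
    have hmj : pvMis s a (i.toNat + (j - i - 1).toNat + 1) = true := by
      have : i.toNat + (j - i - 1).toNat + 1 = j.toNat := by omega
      rw [this]
      rw [pyGetD_toNat s j hj, pyGetD_toNat a j hj] at hne2
      simp only [List.getD_eq_getElem?_getD] at hne2
      simp [pvMis, List.getD_eq_getElem?_getD, hne2]
    have hc : (j + 1 - i).toNat = (j - i - 1).toNat + 2 := by omega
    rw [hc, pvM_both s a _ _ hmi hmj]
    have hjn : i.toNat + (j - i - 1).toNat + 1 = j.toNat := by omega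
    rw [not_or, not_ne_iff, not_ne_iff] at hok
    obtain ⟨hok1, hok2⟩ := hok
    rw [pyGetD_toNat s i hi, pyGetD_toNat a j hj] at hok1
    rw [pyGetD_toNat s j hj, pyGetD_toNat a i hi] at hok2
    have hpal : ∀ m', pvPal s a (i.toNat :: (m' ++ [i.toNat + (j - i - 1).toNat + 1])) = true ↔ pvPal s a m' = true := by
      intro m'
      rw [pvPal_cons_concat, hjn]
      constructor
      · exact fun h => h.2.2
      · exact fun h => ⟨hok1, hok2, h⟩
    have hinner : (j - 1 + 1 - (i + 1)).toNat = (j - i - 1).toNat := by omega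
    have hi1 : (i + 1).toNat = i.toNat + 1 := by omega
    by_cases hf : first = -1
    · have hflv : fl = (i, j) := dif_pos hf
      rw [hflv] at ih
      dsimp only at ih
      simp only [if_pos hf]
      rw [ih (by omega) (fun h => absurd h (by omega))]
      rw [hinner, hi1]
      have hine : ¬ (i = -1) := by omega
      simp only [if_neg hine]
      by_cases hp : pvPal s a (pvM s a (i.toNat + 1) (j - i - 1).toNat) = true
      · rw [if_pos hp, if_pos ((hpal _).mpr hp)]
        have hji : ¬ (j = i) := by omega
        simp only [if_neg hji]
        have hhead : (i.toNat :: (pvM s a (i.toNat + 1) (j - i - 1).toNat ++ [i.toNat + (j - i - 1).toNat + 1])).head? = some i.toNat := rfl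
        have hlast : (i.toNat :: (pvM s a (i.toNat + 1) (j - i - 1).toNat ++ [i.toNat + (j - i - 1).toNat + 1])).getLast? = some (i.toNat + (j - i - 1).toNat + 1) := by
          rw [List.getLast?_cons, List.getLast?_concat]
          simp
        rw [hhead, hlast]
        simp only [Option.map_some, Option.getD_some]
        have e1 : (Int.ofNat i.toNat) = i := Int.toNat_of_nonneg hi
        have e2 : (Int.ofNat (i.toNat + (j - i - 1).toNat + 1)) = j := by
          have : ((i.toNat + (j - i - 1).toNat + 1 : Nat) : Int) = j := by omega
          exact this
        rw [e1, e2]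
        simp only [if_neg hji]
      · rw [if_neg hp, if_neg (fun hh => hp ((hpal _).mp hh))]
    · have hflv : fl = (first, last) := dif_neg hf
      rw [hflv] at ih
      dsimp only at ih
      simp only [if_neg hf]
      rw [ih (by omega) (fun h => absurd h hf)]
      rw [hinner, hi1]
      simp only [if_neg hf]
      by_cases hp : pvPal s a (pvM s a (i.toNat + 1) (j - i - 1).toNat) = true
      · rw [if_pos hp, if_pos ((hpal _).mpr hp)]
      · rw [if_neg hp, if_neg (fun hh => hp ((hpal _).mp hh))]
  | case6 i j first last hij =>
    intro hi hfl
    rw [pvBLoop]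
    simp only [hij, dif_neg, if_false]
    have hc : (j + 1 - i).toNat = 0 := by omega
    rw [hc]
    have hm : pvM s a i.toNat 0 = [] := by simp [pvM]
    rw [hm]
    have hpal : pvPal s a ([] : List Nat) = true := rfl
    simp only [hpal, if_pos, if_true]
    by_cases hf : first = -1
    · have hl := hfl hf
      simp [hf, hl]
    · simp only [hf, if_neg, if_false]
      by_cases hlf : last = first
      · simp [hlf]
      · have : last ≠ first := hlf
        simp [this, hlf]

lemma pvEnumZip (s : List Int) : ∀ (a : List Int) (st : Int),
    PySem.List.enumerate (s.zip a) st =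
      (List.range (min s.length a.length)).map
        (fun k : Nat => (st + (k : Int), s.getD k 0, a.getD k 0)) := by
  induction s with
  | nil =>
    intro a st
    simp [PySem.List.enumerate_nil]
  | cons x s' ih =>
    intro a st
    cases a with
    | nil => simp [PySem.List.enumerate_nil]
    | cons y a' =>
      rw [List.zip_cons_cons, PySem.List.enumerate_cons, ih a' (st + 1)]
      have hmin : min (x :: s').length (y :: a').length = min s'.length a'.length + 1 := by
        simp only [List.length_cons]
        omega
      rw [hmin, List.range_succ_eq_map, List.map_cons, List.map_map]
      congr 1
      · simp
      · apply List.map_congr_left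
        intro k _
        simp only [Function.comp_apply, List.getD_cons_succ]
        congr 1
        push_cast
        ring

lemma pvFoldA (q : List (Int × Int × Int)) (hpos : ∀ t ∈ q, 0 ≤ t.1) :
    q.foldl pvAStep (-1, -1, [], []) =
      (let Q := q.filter (fun t => t.2.1 ≠ t.2.2)
       (((Q.head?.map (fun t => t.1)).getD (-1) : Int),
        (if 2 ≤ Q.length then (Q.getLast?.map (fun t => t.1)).getD (-1) else -1 : Int),
        Q.map (fun t => t.2.1), Q.map (fun t => t.2.2))) := by
  induction q using List.reverseRecOn with
  | nil => simp
  | append_singleton q x ih =>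
    have hposq : ∀ t ∈ q, 0 ≤ t.1 := fun t ht => hpos t (List.mem_append_left _ ht)
    have hposx : 0 ≤ x.1 := hpos x (List.mem_append_right _ (List.mem_singleton_self x))
    rw [List.foldl_append, List.foldl_cons, List.foldl_nil, ih hposq]
    by_cases hx : x.2.1 = x.2.2
    · have hfilt : (q ++ [x]).filter (fun t => decide (t.2.1 ≠ t.2.2)) =
          q.filter (fun t => decide (t.2.1 ≠ t.2.2)) := by
        rw [List.filter_append]
        simp [hx]
      simp only [hfilt]
      unfold pvAStep
      simp [hx]
    · have hfilt : (q ++ [x]).filter (fun t => decide (t.2.1 ≠ t.2.2)) =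
          q.filter (fun t => decide (t.2.1 ≠ t.2.2)) ++ [x] := by
        rw [List.filter_append]
        simp [hx]
      simp only [hfilt]
      cases hQe : q.filter (fun t => decide (t.2.1 ≠ t.2.2)) with
      | nil =>
        unfold pvAStep
        simp [hQe, hx]
      | cons h0 t0 =>
        have hmem : h0 ∈ q := by
          have : h0 ∈ q.filter (fun t => decide (t.2.1 ≠ t.2.2)) := by
            rw [hQe]; exact List.mem_cons_self
          exact List.mem_of_mem_filter this
        have hpos0 : 0 ≤ h0.1 := hposq h0 hmem
        unfold pvAStep
        simp only [hQe, List.head?_cons, Option.map_some, Option.getD_some]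
        rw [if_neg (by push_neg; intro _; omega), if_pos hx]
        have hhead : ((h0 :: t0) ++ [x]).head? = some h0 := rfl
        have hlast : ((h0 :: t0) ++ [x]).getLast? = some x := by
          rw [List.getLast?_concat]
        have hlen : 2 ≤ ((h0 :: t0) ++ [x]).length := by
          simp only [List.length_append, List.length_cons, List.length_singleton]
          omega
        rw [hhead, hlast]
        simp only [Option.map_some, Option.getD_some, if_pos hlen, List.map_append]
        simp


lemma pvRight_bridge (M : List Nat) (hnd : M.Nodup) :
    (if 2 ≤ M.length then (M.getLast?.map Int.ofNat).getD (-1) else (-1 : Int)) =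
      (if (M.getLast?.map Int.ofNat).getD (-1) = (M.head?.map Int.ofNat).getD (-1) then (-1 : Int)
       else (M.getLast?.map Int.ofNat).getD (-1)) := by
  match M with
  | [] => simp
  | [x] => simp
  | x :: y :: t =>
    have hlen : 2 ≤ (x :: y :: t).length := by
      simp only [List.length_cons]
      omega
    rw [if_pos hlen]
    have hb : (y :: t).getLast? = some ((y :: t).getLast (List.cons_ne_nil y t)) :=
      List.getLast?_eq_getLast (List.cons_ne_nil y t)
    have hmem : (y :: t).getLast (List.cons_ne_nil y t) ∈ y :: t := List.getLast_mem _
    have hx : x ∉ y :: t := (List.nodup_cons.mp hnd).1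
    have hxb : (y :: t).getLast (List.cons_ne_nil y t) ≠ x := fun h => hx (h ▸ hmem)
    rw [List.getLast?_cons_cons, hb]
    simp only [List.head?_cons, Option.map_some, Option.getD_some]
    rw [if_neg (by simpa [Int.ofNat_inj] using hxb)]

theorem pvB_eq_spec (s a : List Int) :
    can_sorted_by_reverse_alt s a = pvSpecFun s a := by
  unfold can_sorted_by_reverse_alt pvSpecFun
  rw [pvBLoop_eq s a 0 _ (-1) (-1) le_rfl (fun _ => rfl)]
  have e : ((min s.length a.length : Nat) - 1 + 1 - 0 : Int).toNat = min s.length a.length := by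
    omega
  simp only [e, Int.toNat_zero, ite_true]

theorem pvA_eq_spec (s a : List Int) :
    can_sorted_by_reverse s a = pvSpecFun s a := by
  unfold can_sorted_by_reverse pvSpecFun
  rw [pvEnumZip s a 0]
  have hF : (fun k : Nat => ((0 : Int) + (k : Int), s.getD k 0, a.getD k 0)) =
      (fun k : Nat => ((k : Int), s.getD k 0, a.getD k 0)) := by
    funext k
    simp
  rw [hF]
  have hpos : ∀ t ∈ (List.range (min s.length a.length)).map
      (fun k : Nat => ((k : Int), s.getD k 0, a.getD k 0)), 0 ≤ t.1 := by
    intro t ht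
    obtain ⟨k, _, rfl⟩ := List.mem_map.mp ht
    exact Int.natCast_nonneg k
  rw [pvFoldA _ hpos]
  have hfm : ((List.range (min s.length a.length)).map
        (fun k : Nat => ((k : Int), s.getD k 0, a.getD k 0))).filter
          (fun t => decide (t.2.1 ≠ t.2.2)) =
      (pvM s a 0 (min s.length a.length)).map
        (fun k : Nat => ((k : Int), s.getD k 0, a.getD k 0)) := by
    rw [List.filter_map, pvM, List.range_eq_range']
    have hpred : ((fun t : Int × Int × Int => decide (t.2.1 ≠ t.2.2)) ∘
        fun k : Nat => ((k : Int), s.getD k 0, a.getD k 0)) = pvMis s a := by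
      funext k
      rfl
    rw [hpred]
  simp only [hfm, List.head?_map, List.getLast?_map, Option.map_map, List.map_map,
    List.length_map, PySem.List.slice?_none_none_neg_one, Option.getD_some]
  set M := pvM s a 0 (min s.length a.length) with hM
  have hnd : M.Nodup := (List.nodup_range').filter _
  have hcomp1 : ((fun t : Int × Int × Int => t.1) ∘ fun k : Nat => ((k : Int), s.getD k 0, a.getD k 0)) = Int.ofNat := rfl
  have hcomp2 : ((fun t : Int × Int × Int => t.2.1) ∘ fun k : Nat => ((k : Int), s.getD k 0, a.getD k 0)) = (fun k : Nat => s.getD k 0) := rfl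
  have hcomp3 : ((fun t : Int × Int × Int => t.2.2) ∘ fun k : Nat => ((k : Int), s.getD k 0, a.getD k 0)) = (fun k : Nat => a.getD k 0) := rfl
  simp only [hcomp1, hcomp2, hcomp3]
  have hpal : (M.map (fun k : Nat => s.getD k 0) = (M.map (fun k : Nat => a.getD k 0)).reverse) ↔ pvPal s a M = true :=
    (pvPal_iff s a M).symm
  by_cases hp : pvPal s a M = true
  · rw [if_pos (hpal.mpr hp), if_pos hp]
    rw [pvRight_bridge M hnd]
  · rw [if_neg (fun h => hp (hpal.mp h)), if_neg hp]

-- ===== VERDICT (by name: the statement is the Claim_ definition above) =====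
theorem can_sorted_by_reverse_spec : Claim_equal_can_sorted_by_reverse := by
  intro s a _
  unfold Spec_can_sorted_by_reverse
  rw [pvA_eq_spec, pvB_eq_spec]
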